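-- pv_equiv track=rewrite | github.com/Mimix231/sm64dx | ai_tools/split_module.py | remove_line_ranges
-- ===== SOURCE A (Python) =====
-- from typing import Iterable, Sequence
--
-- def normalize_blank_runs(text: str) -> str:
--     lines = text.splitlines()
--     normalized: list[str] = []
--     blank_run = 0
--     for line in lines:
--         if line.strip():
--             blank_run = 0
--             normalized.append(line.rstrip())
--             continue
--         blank_run += 1
--         if blank_run <= 2:
--             normalized.append("")
--     return "\n".join(normalized).rstrip() + "\n"
--
-- def remove_line_ranges(lines: Sequence[str], ranges: Sequence[tuple[int, int]]) -> str:
--     mask = [False] * (len(lines) + 1)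
--     for start_line, end_line in ranges:
--         for line_no in range(start_line, end_line + 1):
--             if 1 <= line_no <= len(lines):
--                 mask[line_no] = True
--     remaining = [line for index, line in enumerate(lines, start=1) if not mask[index]]
--     return normalize_blank_runs("".join(remaining))
-- ===== SOURCE B (Python) =====
-- from typing import Sequence
--
-- def remove_line_ranges(lines: Sequence[str], ranges: Sequence[tuple[int, int]]) -> str:
--     # difference array: mark clamped range endpoints, prefix-sum while scanning the lines
--     n = len(lines)
--     diff = [0] * (n + 2)
--     for s, e in ranges:
--         lo = max(s, 1)
--         hi = min(e, n)
--         if lo <= hi: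
--             diff[lo] += 1
--             diff[hi + 1] -= 1
--     remaining = []
--     cov = 0
--     for i, line in enumerate(lines, start=1):
--         cov += diff[i]
--         if cov == 0:
--             remaining.append(line)
--     # normalize blank runs by inspecting the tail of the output list
--     kept = []
--     for ln in "".join(remaining).splitlines():
--         t = ln.rstrip()
--         if t:
--             kept.append(t)
--         elif not (len(kept) >= 2 and kept[-1] == "" and kept[-2] == ""):
--             kept.append("")
--     while kept and kept[-1] == "":
--         kept.pop()
--     return "\n".join(kept) + "\n"
-- ===== Notes on version B (the rewrite author's own statement) =====
-- stated objective: alternative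
-- what changed: B replaces A's boolean mask (one write per line number of every range) by a difference array over clamped range endpoints with a running prefix sum while scanning the lines, and replaces A's blank-run counter plus final string rstrip by a fold that inspects the tail of the output list and pops trailing blank entries.
import Mathlib
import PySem

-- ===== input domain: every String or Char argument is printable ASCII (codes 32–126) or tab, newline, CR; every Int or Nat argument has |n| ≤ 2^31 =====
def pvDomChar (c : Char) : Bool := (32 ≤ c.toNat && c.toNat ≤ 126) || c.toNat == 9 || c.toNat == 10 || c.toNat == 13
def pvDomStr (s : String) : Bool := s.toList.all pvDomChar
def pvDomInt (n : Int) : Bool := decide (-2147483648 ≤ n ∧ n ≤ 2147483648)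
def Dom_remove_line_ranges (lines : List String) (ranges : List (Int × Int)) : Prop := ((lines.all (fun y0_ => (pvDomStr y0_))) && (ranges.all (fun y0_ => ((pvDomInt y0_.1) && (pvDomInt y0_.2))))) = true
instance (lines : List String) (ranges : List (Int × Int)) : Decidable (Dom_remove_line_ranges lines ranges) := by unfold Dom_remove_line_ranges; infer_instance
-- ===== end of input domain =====

-- B replaces A's per-index mask writes (one write per line number of every range) by a
-- difference array over clamped range endpoints with a running prefix sum, and normalizes blank
-- runs by inspecting the tail of the output list instead of keeping a blank counter and
-- rstripping the joined string (objective: alternative).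

-- ===== PORT A =====
-- helper from the same module: normalize_blank_runs
def pvNormA (text : String) : String :=
  let lines := PySem.Str.splitlines text
  let st := lines.foldl
    (fun (st : List String × Int) line =>
      if PySem.Str.strip line ≠ "" then (st.1 ++ [PySem.Str.rstrip line], 0)
      else
        let br := st.2 + 1
        if br ≤ 2 then (st.1 ++ [""], br) else (st.1, br))
    ([], 0)
  PySem.Str.rstrip (PySem.Str.join "\n" st.1) ++ "\n"

def remove_line_ranges (lines : List String) (ranges : List (Int × Int)) : String :=
  let mask : List Bool :=
    ranges.foldl
      (fun mask se =>
        (PySem.List.pyRange se.1 (se.2 + 1) 1).foldl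
          (fun mask line_no =>
            if 1 ≤ line_no ∧ line_no ≤ (lines.length : Int) then mask.set line_no.toNat true
            else mask)
          mask)
      (List.replicate (lines.length + 1) false)
  let remaining := (PySem.List.enumerate lines 1).filterMap
    (fun p => if PySem.List.pyGetD mask p.1 false then none else some p.2)
  pvNormA (PySem.Str.join "" remaining)

-- ===== PORT B =====
-- the while-pop loop of Source B: drop trailing "" entries
def pvPopBlanks : List String → List String
  | [] => []
  | x :: xs =>
    let r := pvPopBlanks xs
    if x = "" ∧ r = [] then [] else x :: r

def remove_line_ranges_alt (lines : List String) (ranges : List (Int × Int)) : String :=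
  let n : Int := lines.length
  let diff : List Int :=
    ranges.foldl
      (fun diff se =>
        if max se.1 1 ≤ min se.2 n then
          (diff.set (max se.1 1).toNat (PySem.List.pyGetD diff (max se.1 1) 0 + 1)).set
            (min se.2 n + 1).toNat
            (PySem.List.pyGetD (diff.set (max se.1 1).toNat (PySem.List.pyGetD diff (max se.1 1) 0 + 1))
              (min se.2 n + 1) 0 - 1)
        else diff)
      (List.replicate (lines.length + 2) 0)
  let remaining := ((PySem.List.enumerate lines 1).foldl
      (fun (st : List String × Int) p =>
        let cov := st.2 + PySem.List.pyGetD diff p.1 0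
        if cov = 0 then (st.1 ++ [p.2], cov) else (st.1, cov))
      ([], 0)).1
  let kept := (PySem.Str.splitlines (PySem.Str.join "" remaining)).foldl
    (fun kept ln =>
      let t := PySem.Str.rstrip ln
      if t ≠ "" then kept ++ [t]
      else if 2 ≤ kept.length ∧ kept.getLast? = some "" ∧ kept[kept.length - 2]? = some "" then kept
      else kept ++ [""]) []
  PySem.Str.join "\n" (pvPopBlanks kept) ++ "\n"

-- ===== PRECONDITION & SPEC =====
def Spec_remove_line_ranges (lines : List String) (ranges : List (Int × Int)) (out : String) : Prop := out = remove_line_ranges_alt lines ranges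
instance (lines : List String) (ranges : List (Int × Int)) (out : String) : Decidable (Spec_remove_line_ranges lines ranges out) := by unfold Spec_remove_line_ranges; infer_instance

-- ===== CLAIM (what is proved, stated in full; the proofs are below) =====
def Claim_equal_remove_line_ranges : Prop := ∀ (lines : List String) (ranges : List (Int × Int)), Dom_remove_line_ranges lines ranges → Spec_remove_line_ranges lines ranges (remove_line_ranges lines ranges)

-- ===== LEMMAS AND PROOFS =====

-- number of trailing "" entries of a list
def pvTB (l : List String) : Nat := (l.reverse.takeWhile (· == "")).length

theorem pvTB_snoc_nonblank (l : List String) (t : String) (ht : t ≠ "") :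
    pvTB (l ++ [t]) = 0 := by
  simp [pvTB, List.takeWhile, ht]

theorem pvTB_snoc_blank (l : List String) : pvTB (l ++ [""]) = pvTB l + 1 := by
  simp [pvTB, List.takeWhile]

-- Source B's "last two entries are blank" test counts the trailing blanks
theorem pvCond_iff (l : List String) :
    (2 ≤ l.length ∧ l.getLast? = some "" ∧ l[l.length - 2]? = some "") ↔ 2 ≤ pvTB l := by
  rw [show l = l.reverse.reverse by simp]
  generalize l.reverse = rl
  match rl with
  | [] => simp [pvTB]
  | [a] =>
    cases h : a == "" <;> simp [pvTB, List.takeWhile, h]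
  | a :: b :: u =>
    have hrev : (a :: b :: u).reverse = u.reverse ++ [b, a] := by simp
    simp only [pvTB, List.reverse_reverse, hrev]
    have hlen : (u.reverse ++ [b, a]).length = u.length + 2 := by simp
    have hg : (u.reverse ++ [b, a]).getLast? = some a := by
      simp [List.getLast?_append]
    have hi : (u.reverse ++ [b, a])[u.length + 2 - 2]? = some b := by
      rw [show u.length + 2 - 2 = u.length by omega,
        List.getElem?_append_right (by simp)]
      simp
    rw [hlen, hg, hi]
    cases ha : a == "" <;> cases hb : b == "" <;>
      simp_all [List.takeWhile] <;> try simp [beq_eq_false_iff_ne.mpr hb]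

theorem pvRstrip_idem (cs : List Char) :
    PySem.Chars.rstrip (PySem.Chars.rstrip cs) = PySem.Chars.rstrip cs := by
  simp only [PySem.Chars.rstrip, List.reverse_reverse]
  congr 1
  generalize cs.reverse = l
  induction l with
  | nil => simp
  | cons a t ih =>
    by_cases h : PySem.Chars.isspace a
    · simp [h, ih]
    · simp [h]

theorem pvRstripNil_iff (cs : List Char) :
    PySem.Chars.rstrip cs = [] ↔ cs.all PySem.Chars.isspace := by
  simp [PySem.Chars.rstrip, List.dropWhile_eq_nil_iff, List.all_eq_true]

theorem pvAllDrop (l : List Char) :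
    (l.dropWhile PySem.Chars.isspace).all PySem.Chars.isspace ↔ l.all PySem.Chars.isspace := by
  induction l with
  | nil => simp
  | cons a t ih =>
    by_cases h : PySem.Chars.isspace a <;> simp [h, ih]

theorem pvToListNil_iff (s : String) : s.toList = [] ↔ s = "" := by
  constructor
  · intro h; have := congrArg String.ofList h; simpa using this
  · intro h; simp [h]

-- the two blank-line tests agree
theorem pvStripEmpty_iff (s : String) :
    PySem.Str.strip s = "" ↔ PySem.Str.rstrip s = "" := by
  rw [← pvToListNil_iff, ← pvToListNil_iff]
  simp only [PySem.Str.strip, PySem.Str.rstrip, String.toList_ofList]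
  rw [PySem.Chars.strip, pvRstripNil_iff, pvRstripNil_iff, PySem.Chars.lstrip, pvAllDrop]

theorem pvRstrip_snoc_space (l : List Char) (c : Char) (hc : PySem.Chars.isspace c = true) :
    PySem.Chars.rstrip (l ++ [c]) = PySem.Chars.rstrip l := by
  simp [PySem.Chars.rstrip, hc]

theorem pvRstrip_append_fixed (a t : List Char) (ht : PySem.Chars.rstrip t = t) (hne : t ≠ []) :
    PySem.Chars.rstrip (a ++ t) = a ++ t := by
  have h1 : List.dropWhile PySem.Chars.isspace t.reverse = t.reverse := by
    have := congrArg List.reverse ht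
    simpa [PySem.Chars.rstrip] using this
  simp [PySem.Chars.rstrip, List.dropWhile_append, h1, hne]

theorem pvJoin_snoc (sep x : List Char) (ps : List (List Char)) :
    PySem.Chars.join sep (ps ++ [x]) =
      if ps = [] then x else PySem.Chars.join sep ps ++ sep ++ x := by
  induction ps with
  | nil => simp [PySem.Chars.join, List.intercalate]
  | cons a t ih =>
    cases t with
    | nil => simp [PySem.Chars.join, List.intercalate]
    | cons b u =>
      have h1 : PySem.Chars.join sep ((a :: b :: u) ++ [x])
          = a ++ sep ++ PySem.Chars.join sep ((b :: u) ++ [x]) := by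
        simpa using PySem.Chars.join_cons_cons sep a b (u ++ [x])
      rw [h1, ih]
      simp [PySem.Chars.join_cons_cons]

theorem pvPopBlanks_snoc_blank (l : List String) :
    pvPopBlanks (l ++ [""]) = pvPopBlanks l := by
  induction l with
  | nil => simp [pvPopBlanks]
  | cons a t ih => simp [pvPopBlanks, ih]

theorem pvPopBlanks_snoc_nonblank (l : List String) (t : String) (ht : t ≠ "") :
    pvPopBlanks (l ++ [t]) = l ++ [t] := by
  induction l with
  | nil => simp [pvPopBlanks, ht]
  | cons a u ih => simp [pvPopBlanks, ih]

-- rstrip of the "\n"-join equals the join of the list with trailing blanks popped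
theorem pvPhase3 (parts : List String)
    (h : ∀ x ∈ parts, PySem.Chars.rstrip x.toList = x.toList) :
    PySem.Chars.rstrip (PySem.Chars.join ['\n'] (parts.map String.toList)) =
      PySem.Chars.join ['\n'] ((pvPopBlanks parts).map String.toList) := by
  induction parts using List.reverseRecOn with
  | nil => simp [PySem.Chars.join, List.intercalate, pvPopBlanks, PySem.Chars.rstrip]
  | append_singleton init x ih =>
    have hx := h x (by simp)
    have hinit : ∀ y ∈ init, PySem.Chars.rstrip y.toList = y.toList := by
      intro y hy; exact h y (by simp [hy])
    by_cases hxe : x = ""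
    · subst hxe
      rw [pvPopBlanks_snoc_blank]
      rw [List.map_append]; simp only [List.map_cons, List.map_nil]; rw [pvJoin_snoc]
      by_cases hie : init = []
      · simp [hie, PySem.Chars.join, List.intercalate, pvPopBlanks, PySem.Chars.rstrip]
      · have : ¬ (init.map String.toList = []) := by simpa using hie
        rw [if_neg this]
        show PySem.Chars.rstrip ((PySem.Chars.join ['\n'] (init.map String.toList) ++ ['\n']) ++ []) = _
        rw [List.append_nil, pvRstrip_snoc_space _ '\n' (by decide)]
        exact ih hinit
    · have hxl : x.toList ≠ [] := by
        intro hc; exact hxe ((pvToListNil_iff x).mp hc)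
      rw [List.map_append]; simp only [List.map_cons, List.map_nil]
      rw [pvJoin_snoc, pvPopBlanks_snoc_nonblank _ _ hxe, List.map_append]
      simp only [List.map_cons, List.map_nil]; rw [pvJoin_snoc]
      by_cases hie : init = []
      · have : init.map String.toList = [] := by simp [hie]
        rw [if_pos this]
        exact hx
      · have hne : ¬ (init.map String.toList = []) := by simpa using hie
        rw [if_neg hne]
        rw [show PySem.Chars.join ['\n'] (init.map String.toList) ++ ['\n'] ++ x.toList
            = (PySem.Chars.join ['\n'] (init.map String.toList) ++ ['\n']) ++ x.toList by simp]
        exact pvRstrip_append_fixed _ _ hx hxl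

-- A's inner range loop preserves the mask length
theorem pvMaskFoldLen (n : Nat) (L : List Int) (m : List Bool) :
    (L.foldl (fun mask line_no =>
        if 1 ≤ line_no ∧ line_no ≤ (n : Int) then mask.set line_no.toNat true else mask) m).length
      = m.length := by
  induction L generalizing m with
  | nil => rfl
  | cons j L ih =>
    rw [List.foldl_cons, ih]
    split <;> simp

-- what A's inner range loop writes
theorem pvMaskFoldGetD (n : Nat) (L : List Int) (m : List Bool) (i : Nat)
    (hm : m.length = n + 1) (hi : i ≤ n) :
    (L.foldl (fun mask line_no =>
        if 1 ≤ line_no ∧ line_no ≤ (n : Int) then mask.set line_no.toNat true else mask) m).getD i false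
      = (m.getD i false || L.any (fun j => decide (1 ≤ j) && decide (j ≤ (n : Int)) && decide (j = (i : Int)))) := by
  induction L generalizing m with
  | nil => simp
  | cons j L ih =>
    rw [List.foldl_cons]
    by_cases hj : 1 ≤ j ∧ j ≤ (n : Int)
    · rw [if_pos hj]
      rw [ih _ (by rw [List.length_set]; exact hm)]
      by_cases hji : j = (i : Int)
      · have hlt : i < m.length := by omega
        have h1 : 1 ≤ i := by omega
        simp [List.any_cons, hji, List.getD_eq_getElem?_getD, List.getElem?_set, hlt, h1, hi]
      · have hne : j.toNat ≠ i := by omega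
        have hne' : (m.set j.toNat true)[i]? = m[i]? := by
          simp [List.getElem?_set, hne]
        simp [List.any_cons, hji, List.getD_eq_getElem?_getD, hne']
    · rw [if_neg hj]
      rw [ih _ hm]
      have : (decide (1 ≤ j) && decide (j ≤ (n : Int)) && decide (j = (i : Int))) = false := by
        rcases not_and_or.mp hj with h | h <;> simp [h]
      simp [this]

-- what A's whole mask loop computes: index i is marked iff some range covers it
theorem pvMaskOuter (n : Nat) (R : List (Int × Int)) (m : List Bool) (i : Nat)
    (hm : m.length = n + 1) (hi : 1 ≤ i) (hin : i ≤ n) :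
    (R.foldl (fun mask se =>
        (PySem.List.pyRange se.1 (se.2 + 1) 1).foldl
          (fun mask line_no =>
            if 1 ≤ line_no ∧ line_no ≤ (n : Int) then mask.set line_no.toNat true else mask) mask) m).getD i false
      = (m.getD i false || R.any (fun r => decide (r.1 ≤ (i : Int)) && decide ((i : Int) ≤ r.2))) := by
  induction R generalizing m with
  | nil => simp
  | cons r R ih =>
    rw [List.foldl_cons, ih _ (by rw [pvMaskFoldLen]; exact hm)]
    rw [pvMaskFoldGetD n _ m i hm hin]
    have hcov : (PySem.List.pyRange r.1 (r.2 + 1) 1).any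
        (fun j => decide (1 ≤ j) && decide (j ≤ (n : Int)) && decide (j = (i : Int)))
        = (decide (r.1 ≤ (i : Int)) && decide ((i : Int) ≤ r.2)) := by
      rcases h : (decide (r.1 ≤ (i : Int)) && decide ((i : Int) ≤ r.2)) with _ | _
      · simp only [List.any_eq_false]
        intro j hj
        rw [PySem.List.mem_pyRange_one] at hj
        simp only [Bool.and_eq_true, decide_eq_true_eq, not_and]
        intro _ hji
        subst hji
        simp only [Bool.and_eq_false_iff, decide_eq_false_iff_not, not_le] at h
        omega
      · simp only [List.any_eq_true]
        refine ⟨(i : Int), ?_, ?_⟩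
        · rw [PySem.List.mem_pyRange_one]
          simp only [Bool.and_eq_true, decide_eq_true_eq] at h
          omega
        · simp; omega
    rw [hcov, List.any_cons]
    cases m.getD i false <;> cases (decide (r.1 ≤ (i : Int)) && decide ((i : Int) ≤ r.2)) <;> simp

theorem pvMemEnumerate {α : Type} (xs : List α) (s : Int) (p : Int × α)
    (hp : p ∈ PySem.List.enumerate xs s) : s ≤ p.1 ∧ p.1 < s + xs.length := by
  induction xs generalizing s with
  | nil => simp [PySem.List.enumerate_nil] at hp
  | cons a t ih =>
    rw [PySem.List.enumerate_cons] at hp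
    rcases List.mem_cons.mp hp with h | h
    · subst h; simp
    · have := ih (s + 1) h
      simp at this ⊢
      omega

theorem pvFilterMapIf {α β : Type} (L : List α) (c : α → Bool) (f : α → β) :
    L.filterMap (fun p => if c p then none else some (f p)) = (L.filter (fun p => !(c p))).map f := by
  induction L with
  | nil => rfl
  | cons a t ih =>
    cases h : c a <;> simp [h, ih]

-- number of clamped ranges covering line i (B's prefix sum value)
def pvCov (ranges : List (Int × Int)) (n : Nat) (i : Int) : Int :=
  (ranges.countP (fun r => decide (max r.1 1 ≤ i) && decide (i ≤ min r.2 (n : Int))) : Int)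

theorem pvDiffGetD (n : Nat) (R : List (Int × Int)) (d : List Int) (k : Nat)
    (hd : d.length = n + 2) (hk1 : 1 ≤ k) (hk2 : k ≤ n + 1) :
    (R.foldl (fun diff se =>
      if max se.1 1 ≤ min se.2 (n : Int) then
        (diff.set (max se.1 1).toNat (PySem.List.pyGetD diff (max se.1 1) 0 + 1)).set
          (min se.2 (n : Int) + 1).toNat
          (PySem.List.pyGetD (diff.set (max se.1 1).toNat (PySem.List.pyGetD diff (max se.1 1) 0 + 1))
            (min se.2 (n : Int) + 1) 0 - 1)
      else diff) d).getD k 0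
    = d.getD k 0
      + (R.countP (fun r => decide (max r.1 1 ≤ min r.2 (n : Int)) && decide (max r.1 1 = (k : Int))) : Int)
      - (R.countP (fun r => decide (max r.1 1 ≤ min r.2 (n : Int)) && decide (min r.2 (n : Int) + 1 = (k : Int))) : Int) := by
  induction R generalizing d with
  | nil => simp
  | cons r R ih =>
    rw [List.foldl_cons]
    by_cases hne : max r.1 1 ≤ min r.2 (n : Int)
    · rw [if_pos hne]
      have hlo1 : (1 : Int) ≤ max r.1 1 := by omega
      have hlon : max r.1 1 ≤ (n : Int) := by omega
      have hhi : (2 : Int) ≤ min r.2 (n : Int) + 1 := by omega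
      have hhin : min r.2 (n : Int) + 1 ≤ (n : Int) + 1 := by omega
      have hab : (max r.1 1).toNat ≠ (min r.2 (n : Int) + 1).toNat := by omega
      have hlenA : (d.set (max r.1 1).toNat (PySem.List.pyGetD d (max r.1 1) 0 + 1)).length = n + 2 := by
        simp [hd]
      have hlen2 : ((d.set (max r.1 1).toNat (PySem.List.pyGetD d (max r.1 1) 0 + 1)).set
          (min r.2 (n : Int) + 1).toNat
          (PySem.List.pyGetD (d.set (max r.1 1).toNat (PySem.List.pyGetD d (max r.1 1) 0 + 1))
            (min r.2 (n : Int) + 1) 0 - 1)).length = n + 2 := by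
        simp [hd]
      rw [ih _ hlen2]
      -- compute the two counts for r
      rw [List.countP_cons, List.countP_cons]
      have hgd : ∀ (l : List Int) (a : Nat) (v : Int), a < l.length →
          (l.set a v).getD a 0 = v := by
        intro l a v h
        simp [List.getD_eq_getElem?_getD, List.getElem?_set, h]
      have hgd2 : ∀ (l : List Int) (a b : Nat) (v : Int), a ≠ b →
          (l.set a v).getD b 0 = l.getD b 0 := by
        intro l a b v h
        simp [List.getD_eq_getElem?_getD, List.getElem?_set, h]
      have hgetA : PySem.List.pyGetD d (max r.1 1) 0 = d.getD (max r.1 1).toNat 0 :=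
        PySem.List.pyGetD_of_nonneg _ _ (by omega)
      have hgetB : PySem.List.pyGetD (d.set (max r.1 1).toNat (PySem.List.pyGetD d (max r.1 1) 0 + 1))
          (min r.2 (n : Int) + 1) 0
          = d.getD (min r.2 (n : Int) + 1).toNat 0 := by
        rw [PySem.List.pyGetD_of_nonneg _ _ (by omega), hgd2 _ _ _ _ hab]
      by_cases hk : (max r.1 1) = (k : Int)
      · -- k is the lo endpoint: +1
        have hkn : (max r.1 1).toNat = k := by omega
        have hknb : (min r.2 (n:Int) + 1).toNat ≠ k := by omega
        rw [hgd2 _ _ _ _ hknb, hgetA, hkn, hgd _ _ _ (by omega)]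
        have c1 : (decide (max r.1 1 ≤ min r.2 (n:Int)) && decide (max r.1 1 = (k:Int))) = true := by
          simp only [Bool.and_eq_true, decide_eq_true_eq]; exact ⟨hne, hk⟩
        have c2 : (decide (max r.1 1 ≤ min r.2 (n:Int)) && decide (min r.2 (n:Int) + 1 = (k:Int))) = false := by
          rw [Bool.eq_false_iff]; simp only [ne_eq, Bool.and_eq_true, decide_eq_true_eq]; omega
        simp only [c1, c2, if_true, if_false]
        push_cast
        ring
      · by_cases hk' : (min r.2 (n : Int) + 1) = (k : Int)
        · have hkn : (min r.2 (n:Int) + 1).toNat = k := by omega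
          rw [hkn, hgd _ _ _ (by omega), hgetB, hkn]
          have c1 : (decide (max r.1 1 ≤ min r.2 (n:Int)) && decide (max r.1 1 = (k:Int))) = false := by
            rw [Bool.eq_false_iff]; simp only [ne_eq, Bool.and_eq_true, decide_eq_true_eq]; omega
          have c2 : (decide (max r.1 1 ≤ min r.2 (n:Int)) && decide (min r.2 (n:Int) + 1 = (k:Int))) = true := by
            simp only [Bool.and_eq_true, decide_eq_true_eq]; exact ⟨hne, hk'⟩
          simp only [c1, c2, if_true, if_false]
          push_cast
          ring
        · have h1 : (max r.1 1).toNat ≠ k := by omega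
          have h2 : (min r.2 (n:Int) + 1).toNat ≠ k := by omega
          rw [hgd2 _ _ _ _ h2, hgd2 _ _ _ _ h1]
          have c1 : (decide (max r.1 1 ≤ min r.2 (n:Int)) && decide (max r.1 1 = (k:Int))) = false := by
            rw [Bool.eq_false_iff]; simp only [ne_eq, Bool.and_eq_true, decide_eq_true_eq]; omega
          have c2 : (decide (max r.1 1 ≤ min r.2 (n:Int)) && decide (min r.2 (n:Int) + 1 = (k:Int))) = false := by
            rw [Bool.eq_false_iff]; simp only [ne_eq, Bool.and_eq_true, decide_eq_true_eq]; omega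
          simp only [c1, c2, if_true, if_false]
          push_cast
          ring
    · rw [if_neg hne, ih _ hd, List.countP_cons, List.countP_cons]
      have c : (decide (max r.1 1 ≤ min r.2 (n:Int)) : Bool) = false := by simp [hne]
      simp only [c, Bool.false_and, if_false]
      push_cast
      ring

theorem pvCovStep (ranges : List (Int × Int)) (n : Nat) (s : Int)
    (h1 : 1 ≤ s) (h2 : s ≤ (n : Int)) :
    pvCov ranges n (s - 1)
      + ((ranges.countP (fun r => decide (max r.1 1 ≤ min r.2 (n : Int)) && decide (max r.1 1 = s)) : Int)
        - (ranges.countP (fun r => decide (max r.1 1 ≤ min r.2 (n : Int)) && decide (min r.2 (n : Int) + 1 = s)) : Int))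
      = pvCov ranges n s := by
  induction ranges with
  | nil => simp [pvCov]
  | cons r R ih =>
    simp only [pvCov, List.countP_cons] at ih ⊢
    push_cast
    split_ifs with hA hB hC hD hE <;> push_cast <;>
      simp only [Bool.and_eq_true, decide_eq_true_eq] at * <;> omega

theorem pvCovZero (ranges : List (Int × Int)) (n : Nat) (i : Int)
    (h1 : 1 ≤ i) (h2 : i ≤ (n : Int)) :
    (pvCov ranges n i = 0)
      ↔ (ranges.any fun r => decide (r.1 ≤ i) && decide (i ≤ r.2)) = false := by
  rw [pvCov, Int.natCast_eq_zero, List.countP_eq_zero, List.any_eq_false]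
  constructor
  · intro h r hr
    have := h r hr
    simp only [Bool.and_eq_true, decide_eq_true_eq] at this ⊢
    omega
  · intro h r hr
    have := h r hr
    simp only [Bool.and_eq_true, decide_eq_true_eq] at this ⊢
    omega

theorem pvCovFold (ranges : List (Int × Int)) (n : Nat) (d : List Int)
    (hchar : ∀ k : Int, 1 ≤ k → k ≤ (n : Int) →
      pvCov ranges n (k - 1) + PySem.List.pyGetD d k 0 = pvCov ranges n k)
    (ls : List String) (s : Int) (acc : List String) (cov : Int)
    (hs : 1 ≤ s) (hn : s + ls.length ≤ (n : Int) + 1) (hcov : cov = pvCov ranges n (s - 1)) :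
    ((PySem.List.enumerate ls s).foldl
      (fun (st : List String × Int) p =>
        let cov := st.2 + PySem.List.pyGetD d p.1 0
        if cov = 0 then (st.1 ++ [p.2], cov) else (st.1, cov))
      (acc, cov)).1
    = acc ++ ((PySem.List.enumerate ls s).filter
        (fun p => !(ranges.any fun r => decide (r.1 ≤ p.1) && decide (p.1 ≤ r.2)))).map
        (fun p => p.2) := by
  induction ls generalizing s acc cov with
  | nil => simp [PySem.List.enumerate_nil]
  | cons x ls ih =>
    rw [PySem.List.enumerate_cons, List.foldl_cons, List.filter_cons]
    have hsn : s ≤ (n : Int) := by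
      have : (ls.length : Int) ≥ 0 := by positivity
      simp at hn
      omega
    have hstep : cov + PySem.List.pyGetD d s 0 = pvCov ranges n s := by
      rw [hcov]; exact hchar s hs hsn
    simp only
    by_cases hz : cov + PySem.List.pyGetD d s 0 = 0
    · rw [if_pos hz]
      have hany : (ranges.any fun r => decide (r.1 ≤ s) && decide (s ≤ r.2)) = false := by
        rw [← pvCovZero ranges n s hs hsn, ← hstep, hz]
      rw [show (!(ranges.any fun r => decide (r.1 ≤ s) && decide (s ≤ r.2))) = true by rw [hany]; rfl]
      rw [ih (s + 1) (acc ++ [x]) (cov + PySem.List.pyGetD d s 0) (by omega)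
        (by simp at hn ⊢; omega) (by rw [hstep]; norm_num)]
      simp
    · rw [if_neg hz]
      cases hany : (ranges.any fun r => decide (r.1 ≤ s) && decide (s ≤ r.2)) with
      | false =>
        exact absurd (hstep ▸ (pvCovZero ranges n s hs hsn).mpr hany) hz
      | true =>
        rw [ih (s + 1) acc (cov + PySem.List.pyGetD d s 0) (by omega)
          (by simp at hn ⊢; omega) (by rw [hstep]; norm_num)]
        simp

theorem pvCovAtZero (ranges : List (Int × Int)) (n : Nat) : pvCov ranges n 0 = 0 := by
  rw [pvCov, Int.natCast_eq_zero, List.countP_eq_zero]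
  intro r _
  simp only [Bool.and_eq_true, decide_eq_true_eq, not_and]
  omega

-- the final difference array prefix-sums to the coverage count
theorem pvDiffChar (ranges : List (Int × Int)) (n : Nat) (k : Int)
    (hk1 : 1 ≤ k) (hk2 : k ≤ (n : Int)) :
    pvCov ranges n (k - 1)
      + PySem.List.pyGetD
          (ranges.foldl (fun diff se =>
            if max se.1 1 ≤ min se.2 (n : Int) then
              (diff.set (max se.1 1).toNat (PySem.List.pyGetD diff (max se.1 1) 0 + 1)).set
                (min se.2 (n : Int) + 1).toNat
                (PySem.List.pyGetD (diff.set (max se.1 1).toNat (PySem.List.pyGetD diff (max se.1 1) 0 + 1))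
                  (min se.2 (n : Int) + 1) 0 - 1)
            else diff) (List.replicate (n + 2) 0)) k 0
      = pvCov ranges n k := by
  rw [PySem.List.pyGetD_of_nonneg _ _ (by omega)]
  rw [pvDiffGetD n ranges _ k.toNat (by simp) (by omega) (by omega)]
  have hz : (List.replicate (n + 2) (0 : Int)).getD k.toNat 0 = 0 := by
    simp only [List.getD_eq_getElem?_getD, List.getElem?_replicate]
    split <;> rfl
  rw [hz, show ((k.toNat : Int)) = k by omega, zero_add]
  exact pvCovStep ranges n k hk1 hk2

-- the two blank-run folds produce the same list
theorem pvINV (ls : List String) (acc : List String) (br : Int)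
    (hbr : 0 ≤ br) (htb : pvTB acc = min br.toNat 2) :
    (ls.foldl
      (fun (st : List String × Int) line =>
        if PySem.Str.strip line ≠ "" then (st.1 ++ [PySem.Str.rstrip line], 0)
        else
          let br := st.2 + 1
          if br ≤ 2 then (st.1 ++ [""], br) else (st.1, br))
      (acc, br)).1
    = ls.foldl
      (fun kept ln =>
        let t := PySem.Str.rstrip ln
        if t ≠ "" then kept ++ [t]
        else if 2 ≤ kept.length ∧ kept.getLast? = some "" ∧ kept[kept.length - 2]? = some "" then kept
        else kept ++ [""]) acc := by
  induction ls generalizing acc br with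
  | nil => rfl
  | cons ln ls ih =>
    rw [List.foldl_cons, List.foldl_cons]
    by_cases hs : PySem.Str.strip ln ≠ ""
    · have ht : PySem.Str.rstrip ln ≠ "" := fun hc => hs ((pvStripEmpty_iff ln).mpr hc)
      rw [if_pos hs]
      show _ = List.foldl _ (if PySem.Str.rstrip ln ≠ "" then acc ++ [PySem.Str.rstrip ln] else _) ls
      rw [if_pos ht]
      exact ih (acc ++ [PySem.Str.rstrip ln]) 0 le_rfl
        (by rw [pvTB_snoc_nonblank _ _ ht]; simp)
    · have hs' : PySem.Str.strip ln = "" := by simpa using hs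
      have ht : PySem.Str.rstrip ln = "" := (pvStripEmpty_iff ln).mp hs'
      rw [if_neg hs]
      show (List.foldl _ (if br + 1 ≤ 2 then (acc ++ [""], br + 1) else (acc, br + 1)) ls).1
        = List.foldl _ (if PySem.Str.rstrip ln ≠ "" then acc ++ [PySem.Str.rstrip ln]
            else if 2 ≤ acc.length ∧ acc.getLast? = some "" ∧ acc[acc.length - 2]? = some "" then acc
            else acc ++ [""]) ls
      rw [if_neg (show ¬ PySem.Str.rstrip ln ≠ "" by simp [ht])]
      by_cases hb : br + 1 ≤ 2
      · rw [if_pos hb, if_neg (by rw [pvCond_iff, htb]; omega)]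
        exact ih (acc ++ [""]) (br + 1) (by omega)
          (by rw [pvTB_snoc_blank, htb]; omega)
      · rw [if_neg hb, if_pos (by rw [pvCond_iff, htb]; omega)]
        exact ih acc (br + 1) (by omega) (by rw [htb]; omega)

-- every entry the blank-run fold keeps is rstrip-fixed
theorem pvKeptFixed (ls : List String) (acc : List String)
    (hacc : ∀ x ∈ acc, PySem.Chars.rstrip x.toList = x.toList) :
    ∀ x ∈ ls.foldl
      (fun kept ln =>
        let t := PySem.Str.rstrip ln
        if t ≠ "" then kept ++ [t]
        else if 2 ≤ kept.length ∧ kept.getLast? = some "" ∧ kept[kept.length - 2]? = some "" then kept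
        else kept ++ [""]) acc, PySem.Chars.rstrip x.toList = x.toList := by
  induction ls generalizing acc with
  | nil => exact hacc
  | cons ln ls ih =>
    rw [List.foldl_cons]
    apply ih
    intro x hx
    simp only at hx
    split at hx
    · rcases List.mem_append.mp hx with h | h
      · exact hacc x h
      · have hx1 : x = PySem.Str.rstrip ln := by simpa using h
        subst hx1
        show PySem.Chars.rstrip (PySem.Str.rstrip ln).toList = _
        simp [PySem.Str.rstrip, pvRstrip_idem]
    · split at hx
      · exact hacc x hx
      · rcases List.mem_append.mp hx with h | h
        · exact hacc x h
        · have hx1 : x = "" := by simpa using h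
          subst hx1
          simp [PySem.Chars.rstrip]

-- ===== VERDICT (by name: the statement is the Claim_ definition above) =====
theorem remove_line_ranges_spec : Claim_equal_remove_line_ranges := by
  intro lines ranges _
  show remove_line_ranges lines ranges = remove_line_ranges_alt lines ranges
  simp only [remove_line_ranges, remove_line_ranges_alt]
  -- step 1: both "remaining" lists equal the coverage-filtered enumerate
  have hA :
      (PySem.List.enumerate lines 1).filterMap
        (fun p => if PySem.List.pyGetD
            (ranges.foldl
              (fun mask se =>
                (PySem.List.pyRange se.1 (se.2 + 1) 1).foldl
                  (fun mask line_no =>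
                    if 1 ≤ line_no ∧ line_no ≤ (lines.length : Int) then mask.set line_no.toNat true
                    else mask)
                  mask)
              (List.replicate (lines.length + 1) false)) p.1 false then none else some p.2)
      = ((PySem.List.enumerate lines 1).filter
          (fun p => !(ranges.any fun r => decide (r.1 ≤ p.1) && decide (p.1 ≤ r.2)))).map
          (fun p => p.2) := by
    rw [pvFilterMapIf _ _ (fun p : Int × String => p.2)]
    congr 1
    apply List.filter_congr
    intro p hp
    have hb := pvMemEnumerate lines 1 p hp
    congr 1
    rw [PySem.List.pyGetD_of_nonneg _ _ (by omega)]
    rw [pvMaskOuter lines.length ranges _ p.1.toNat (by simp) (by omega) (by omega)]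
    rw [show ((p.1.toNat : Int)) = p.1 by omega]
    have hz : (List.replicate (lines.length + 1) false).getD p.1.toNat false = false := by
      simp only [List.getD_eq_getElem?_getD, List.getElem?_replicate]
      split <;> rfl
    rw [hz, Bool.false_or]
  have hB := pvCovFold ranges lines.length _
    (fun k h1 h2 => pvDiffChar ranges lines.length k h1 h2) lines 1 [] 0 le_rfl
    (by omega) (pvCovAtZero ranges lines.length).symm
  rw [hA, hB, List.nil_append]
  -- step 2: the two normalizations agree on the common remaining text
  generalize ((PySem.List.enumerate lines 1).filter
      (fun p => !(ranges.any fun r => decide (r.1 ≤ p.1) && decide (p.1 ≤ r.2)))).map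
      (fun p => p.2) = rem
  simp only [pvNormA]
  have hkept := pvINV (PySem.Str.splitlines (PySem.Str.join "" rem)) [] 0 le_rfl (by simp [pvTB])
  rw [hkept]
  have hfix := pvKeptFixed (PySem.Str.splitlines (PySem.Str.join "" rem)) [] (by simp)
  generalize hk : (PySem.Str.splitlines (PySem.Str.join "" rem)).foldl _ [] = kept at hfix ⊢
  congr 1
  -- rstrip of the join = join of the popped list
  show PySem.Str.rstrip (PySem.Str.join "\n" kept) = PySem.Str.join "\n" (pvPopBlanks kept)
  simp only [PySem.Str.rstrip, PySem.Str.join, String.toList_ofList]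
  congr 1
  have : ("\n" : String).toList = ['\n'] := rfl
  rw [this]
  exact pvPhase3 kept hfix
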